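-- pv_equiv track=rewrite | github.com/prateekiiest/Competitive-Programming-Algo-DS | CodeForces/contest/[001-100]/006 Beta Round #6/triangle.py | check
-- ===== SOURCE A (Python) =====
-- def check(tri):
--
--     flag  = 0
--     n = len(tri)
--     for i in range(n):
--         for j in range(n):
--             for k in range(n):
--                 if i !=j and j!= k:
--                     if tri[i] + tri[j] >= tri[k]:
--                         continue
--                     else:
--                         flag = 1
--                         break
--
--     if flag == 1:
--         return False
--
--     else:
--         return True
-- ===== SOURCE B (Python) =====
-- def check(tri):
--     # Sort once: the constraint "tri[i]+tri[j] >= tri[k] for all i!=j, j!=k"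
--     # holds iff the sum of the two smallest elements is >= the largest element
--     # (trivially true when there are fewer than two elements).
--     n = len(tri)
--     if n < 2:
--         return True
--     s = sorted(tri)
--     return s[0] + s[1] >= s[-1]
-- ===== Notes on version B (the rewrite author's own statement) =====
-- stated objective: faster
-- what changed: Replaced the O(n^3) triple loop over all (i,j,k) by a single sort: the no-violation condition is equivalent to sum of the two smallest elements >= the largest element.
import Mathlib
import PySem

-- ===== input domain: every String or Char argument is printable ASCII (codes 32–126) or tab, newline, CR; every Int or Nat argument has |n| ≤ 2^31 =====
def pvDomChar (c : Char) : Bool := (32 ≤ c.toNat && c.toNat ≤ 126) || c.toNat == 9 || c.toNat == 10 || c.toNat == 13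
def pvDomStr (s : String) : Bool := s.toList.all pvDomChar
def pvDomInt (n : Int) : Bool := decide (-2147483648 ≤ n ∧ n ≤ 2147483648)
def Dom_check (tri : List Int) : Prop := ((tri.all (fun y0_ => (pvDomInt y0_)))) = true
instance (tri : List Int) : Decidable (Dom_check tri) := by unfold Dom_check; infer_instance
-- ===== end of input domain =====

-- B replaces A's O(n^3) triple loop by one sort and a single comparison
-- (sum of the two smallest elements vs the largest element); same results.

-- ===== PORT A =====
-- inner 'for k in range(n)' loop with its break (returns the updated flag)
def checkInner (tri : List Int) (i j : Int) : List Int → Int → Int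
  | [], flag => flag
  | k :: ks, flag =>
    if i ≠ j ∧ j ≠ k then
      if PySem.List.pyGetD tri i 0 + PySem.List.pyGetD tri j 0 ≥ PySem.List.pyGetD tri k 0 then
        checkInner tri i j ks flag
      else 1
    else checkInner tri i j ks flag

def check (tri : List Int) : Bool :=
  let n : Int := tri.length
  let flag : Int :=
    (PySem.List.pyRange 0 n 1).foldl (fun fl i =>
      (PySem.List.pyRange 0 n 1).foldl (fun fl j =>
        checkInner tri i j (PySem.List.pyRange 0 n 1) fl) fl) 0
  if flag = 1 then false else true

-- ===== PORT B =====
def check_alt (tri : List Int) : Bool :=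
  let n : Int := tri.length
  if n < 2 then true
  else
    let s := PySem.List.sorted tri (fun x => x) false
    decide (PySem.List.pyGetD s 0 0 + PySem.List.pyGetD s 1 0 ≥ PySem.List.pyGetD s (-1) 0)

-- ===== PRECONDITION & SPEC =====
def Spec_check (tri : List Int) (out : Bool) : Prop := out = check_alt tri
instance (tri : List Int) (out : Bool) : Decidable (Spec_check tri out) := by unfold Spec_check; infer_instance

-- ===== CLAIM (what is proved, stated in full; the proofs are below) =====
def Claim_equal_check : Prop := ∀ (tri : List Int), Dom_check tri → Spec_check tri (check tri)

-- ===== LEMMAS AND PROOFS =====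

-- "some forbidden triple exists": the condition A's flag detects
def badB (tri : List Int) : Prop :=
  ∃ i j k : Nat, i < tri.length ∧ j < tri.length ∧ k < tri.length ∧
    i ≠ j ∧ j ≠ k ∧ tri.getD i 0 + tri.getD j 0 < tri.getD k 0

-- index-free (permutation-invariant) form of badB
def badM (l : List Int) : Prop :=
  ∃ y rest, l.Perm (y :: rest) ∧ ∃ a ∈ rest, ∃ c ∈ rest, a + y < c

lemma checkInner_eq (tri : List Int) (i j : Int) (ks : List Int) (flag : Int) :
    checkInner tri i j ks flag =
      if i ≠ j ∧ ∃ k ∈ ks, j ≠ k ∧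
          PySem.List.pyGetD tri i 0 + PySem.List.pyGetD tri j 0 < PySem.List.pyGetD tri k 0
      then 1 else flag := by
  induction ks with
  | nil => simp [checkInner]
  | cons k ks ih =>
    simp only [checkInner, ih, List.exists_mem_cons_iff]
    by_cases hij : i = j
    · simp [hij]
    · by_cases hjk : j = k
      · simp [hjk]
      · by_cases hge : PySem.List.pyGetD tri i 0 + PySem.List.pyGetD tri j 0 ≥ PySem.List.pyGetD tri k 0
        · have hnlt : ¬ (PySem.List.pyGetD tri i 0 + PySem.List.pyGetD tri j 0 < PySem.List.pyGetD tri k 0) := by omega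
          simp [hij, hjk, hge, hnlt]
        · have hlt : PySem.List.pyGetD tri i 0 + PySem.List.pyGetD tri j 0 < PySem.List.pyGetD tri k 0 := by omega
          simp [hij, hjk, hge, hlt]

lemma foldl_if_one (xs : List Int) (c : Int → Prop) [DecidablePred c]
    (f : Int → Int → Int) (hf : ∀ fl x, f fl x = if c x then 1 else fl) (flag : Int) :
    xs.foldl f flag = if ∃ x ∈ xs, c x then 1 else flag := by
  induction xs generalizing flag with
  | nil => simp
  | cons x xs ih =>
    rw [List.foldl_cons, hf, ih]
    by_cases hc : c x
    · simp [hc]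
    · simp [hc]

lemma mem_eraseIdx_of_ne (l : List Int) (i j : Nat) (hi : i < l.length) (hj : j < l.length)
    (hij : i ≠ j) : l[i] ∈ l.eraseIdx j := by
  have hlen : (l.eraseIdx j).length = l.length - 1 := by
    rw [List.length_eraseIdx, if_pos hj]
  by_cases h : i < j
  · have he : (l.eraseIdx j)[i]'(by omega) = l[i] := by
      rw [List.getElem_eraseIdx, dif_pos h]
    exact he ▸ List.getElem_mem _
  · have he : (l.eraseIdx j)[i - 1]'(by omega) = l[i] := by
      rw [List.getElem_eraseIdx, dif_neg (by omega)]
      congr 1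
      omega
    exact he ▸ List.getElem_mem _

lemma exists_index_of_mem_eraseIdx (l : List Int) (j : Nat) (hj : j < l.length) (x : Int)
    (hx : x ∈ l.eraseIdx j) : ∃ i, ∃ _ : i < l.length, i ≠ j ∧ l[i] = x := by
  have hlen : (l.eraseIdx j).length = l.length - 1 := by
    rw [List.length_eraseIdx, if_pos hj]
  obtain ⟨m, hm, he⟩ := List.mem_iff_getElem.mp hx
  rw [List.getElem_eraseIdx] at he
  by_cases h : m < j
  · rw [dif_pos h] at he
    exact ⟨m, by omega, by omega, he⟩
  · rw [dif_neg h] at he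
    exact ⟨m + 1, by omega, by omega, he⟩

lemma big_iff (tri : List Int) :
    (∃ i ∈ PySem.List.pyRange 0 (tri.length : Int) 1,
      ∃ j ∈ PySem.List.pyRange 0 (tri.length : Int) 1, i ≠ j ∧
        ∃ k ∈ PySem.List.pyRange 0 (tri.length : Int) 1, j ≠ k ∧
          PySem.List.pyGetD tri i 0 + PySem.List.pyGetD tri j 0 < PySem.List.pyGetD tri k 0)
    ↔ badB tri := by
  constructor
  · rintro ⟨i, hi, j, hj, hij, k, hk, hjk, hlt⟩
    rw [PySem.List.mem_pyRange_one] at hi hj hk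
    have ei : ((i.toNat : Nat) : Int) = i := Int.toNat_of_nonneg hi.1
    have ej : ((j.toNat : Nat) : Int) = j := Int.toNat_of_nonneg hj.1
    have ek : ((k.toNat : Nat) : Int) = k := Int.toNat_of_nonneg hk.1
    rw [← ei, ← ej, ← ek, PySem.List.pyGetD_natCast, PySem.List.pyGetD_natCast,
      PySem.List.pyGetD_natCast] at hlt
    exact ⟨i.toNat, j.toNat, k.toNat, by omega, by omega, by omega, by omega, by omega, hlt⟩
  · rintro ⟨i, j, k, hi, hj, hk, hij, hjk, hlt⟩
    refine ⟨(i : Int), ?_, (j : Int), ?_, ?_, (k : Int), ?_, ?_, ?_⟩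
    · rw [PySem.List.mem_pyRange_one]; omega
    · rw [PySem.List.mem_pyRange_one]; omega
    · exact fun h => hij (by exact_mod_cast h)
    · rw [PySem.List.mem_pyRange_one]; omega
    · exact fun h => hjk (by exact_mod_cast h)
    · simpa [PySem.List.pyGetD_natCast] using hlt

lemma check_iff (tri : List Int) : check tri = true ↔ ¬ badB tri := by
  have hstep : ∀ (fl i : Int),
      (PySem.List.pyRange 0 (tri.length : Int) 1).foldl
        (fun fl j => checkInner tri i j (PySem.List.pyRange 0 (tri.length : Int) 1) fl) fl
      = if (∃ j ∈ PySem.List.pyRange 0 (tri.length : Int) 1, i ≠ j ∧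
            ∃ k ∈ PySem.List.pyRange 0 (tri.length : Int) 1, j ≠ k ∧
              PySem.List.pyGetD tri i 0 + PySem.List.pyGetD tri j 0 < PySem.List.pyGetD tri k 0)
        then 1 else fl := by
    intro fl i
    exact foldl_if_one _ _ _ (fun fl j => checkInner_eq tri i j _ fl) fl
  have hflag :
      (PySem.List.pyRange 0 (tri.length : Int) 1).foldl
        (fun fl i => (PySem.List.pyRange 0 (tri.length : Int) 1).foldl
          (fun fl j => checkInner tri i j (PySem.List.pyRange 0 (tri.length : Int) 1) fl) fl) 0
      = if (∃ i ∈ PySem.List.pyRange 0 (tri.length : Int) 1,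
            ∃ j ∈ PySem.List.pyRange 0 (tri.length : Int) 1, i ≠ j ∧
              ∃ k ∈ PySem.List.pyRange 0 (tri.length : Int) 1, j ≠ k ∧
                PySem.List.pyGetD tri i 0 + PySem.List.pyGetD tri j 0 < PySem.List.pyGetD tri k 0)
        then 1 else 0 :=
    foldl_if_one _ _ _ (fun fl i => hstep fl i) 0
  have hc : check tri = if ((PySem.List.pyRange 0 (tri.length : Int) 1).foldl
      (fun fl i => (PySem.List.pyRange 0 (tri.length : Int) 1).foldl
        (fun fl j => checkInner tri i j (PySem.List.pyRange 0 (tri.length : Int) 1) fl) fl) 0)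
      = 1 then false else true := rfl
  rw [hc, hflag]
  by_cases hbig : (∃ i ∈ PySem.List.pyRange 0 (tri.length : Int) 1,
      ∃ j ∈ PySem.List.pyRange 0 (tri.length : Int) 1, i ≠ j ∧
        ∃ k ∈ PySem.List.pyRange 0 (tri.length : Int) 1, j ≠ k ∧
          PySem.List.pyGetD tri i 0 + PySem.List.pyGetD tri j 0 < PySem.List.pyGetD tri k 0)
  · have hb := (big_iff tri).mp hbig
    rw [if_pos hbig]
    simp [hb]
  · have hb : ¬ badB tri := fun hb => hbig ((big_iff tri).mpr hb)
    rw [if_neg hbig]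
    simp [hb]

lemma badM_of_perm {l l' : List Int} (h : l.Perm l') : badM l → badM l' := by
  rintro ⟨y, rest, hp, hrest⟩
  exact ⟨y, rest, h.symm.trans hp, hrest⟩

lemma badB_iff_badM (l : List Int) : badB l ↔ badM l := by
  constructor
  · rintro ⟨i, j, k, hi, hj, hk, hij, hjk, hlt⟩
    refine ⟨l[j], l.eraseIdx j, (List.getElem_cons_eraseIdx_perm hj).symm,
      l[i], mem_eraseIdx_of_ne l i j hi hj hij,
      l[k], mem_eraseIdx_of_ne l k j hk hj (by omega), ?_⟩
    rw [List.getD_eq_getElem _ _ hi, List.getD_eq_getElem _ _ hj, List.getD_eq_getElem _ _ hk] at hlt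
    exact hlt
  · rintro ⟨y, rest, hperm, a, ha, c, hc, hlt⟩
    have hy : y ∈ l := hperm.mem_iff.mpr List.mem_cons_self
    obtain ⟨j, hjlen, hjy⟩ := List.mem_iff_getElem.mp hy
    have hpj : (y :: rest).Perm (y :: l.eraseIdx j) := by
      refine hperm.symm.trans ?_
      rw [← hjy]
      exact (List.getElem_cons_eraseIdx_perm hjlen).symm
    have hre : rest.Perm (l.eraseIdx j) := hpj.cons_inv
    obtain ⟨i, hilen, hine, hia⟩ :=
      exists_index_of_mem_eraseIdx l j hjlen a (hre.mem_iff.mp ha)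
    obtain ⟨k, hklen, hkne, hkc⟩ :=
      exists_index_of_mem_eraseIdx l j hjlen c (hre.mem_iff.mp hc)
    refine ⟨i, j, k, hilen, hjlen, hklen, hine, fun h => hkne h.symm, ?_⟩
    rw [List.getD_eq_getElem _ _ hilen, List.getD_eq_getElem _ _ hjlen,
      List.getD_eq_getElem _ _ hklen, hia, hjy, hkc]
    exact hlt

lemma badM_sorted (tri : List Int) (h2 : 2 ≤ tri.length) :
    badM tri ↔
      (PySem.List.sorted tri (fun x => x) false).getD 0 0 +
        (PySem.List.sorted tri (fun x => x) false).getD 1 0 <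
      (PySem.List.sorted tri (fun x => x) false).getD (tri.length - 1) 0 := by
  have hperm : (PySem.List.sorted tri (fun x => x) false).Perm tri :=
    PySem.List.sorted_perm tri (fun x => x) false
  have hlen : (PySem.List.sorted tri (fun x => x) false).length = tri.length := hperm.length_eq
  set s := PySem.List.sorted tri (fun x => x) false with hs
  have h0 : (0 : Nat) < s.length := by omega
  have h1 : (1 : Nat) < s.length := by omega
  have hl : tri.length - 1 < s.length := by omega
  rw [List.getD_eq_getElem _ _ h0, List.getD_eq_getElem _ _ h1, List.getD_eq_getElem _ _ hl]
  have hmono : ∀ (p q : Nat) (hpq : p ≤ q) (hq : q < s.length), s[p]'(Nat.lt_of_le_of_lt hpq hq) ≤ s[q] := by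
    intro p q hpq hq
    exact PySem.List.sorted_id_getElem_mono tri hpq (hs ▸ hq)
  constructor
  · intro hb
    obtain ⟨y, rest, hp, a, ha, c, hc, hlt⟩ := badM_of_perm hperm.symm hb
    -- every element of s is between s[0] and s[tri.length - 1]
    have hbound : ∀ x ∈ s, s[0] ≤ x ∧ x ≤ s[tri.length - 1] := by
      intro x hx
      obtain ⟨t, ht, hxt⟩ := List.mem_iff_getElem.mp hx
      exact ⟨hxt ▸ hmono 0 t (by omega) ht, hxt ▸ hmono t (tri.length - 1) (by omega) hl⟩
    have hcs : c ∈ s := hp.mem_iff.mpr (List.mem_cons_of_mem _ hc)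
    have hys : y ∈ s := hp.mem_iff.mpr List.mem_cons_self
    have has : a ∈ s := hp.mem_iff.mpr (List.mem_cons_of_mem _ ha)
    have hc_le : c ≤ s[tri.length - 1] := (hbound c hcs).2
    have h0y : s[0] ≤ y := (hbound y hys).1
    have h0a : s[0] ≤ a := (hbound a has).1
    -- s[0] + s[1] ≤ a + y
    have hsum : s[0] + s[1] ≤ a + y := by
      by_cases hA : s[1] ≤ a
      · omega
      by_cases hY : s[1] ≤ y
      · omega
      exfalso
      -- both a and y are < s[1]: but s has at most one element < s[1]
      have hcnt1 : s.countP (fun x => decide (x < s[1])) ≤ 1 := by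
        have hshape : s[0] :: s[1] :: s.drop 2 = s := by
          rw [List.getElem_cons_drop, List.getElem_cons_drop, List.drop_zero]
        have hdrop : (s.drop 2).countP (fun x => decide (x < s[1])) = 0 := by
          rw [List.countP_eq_zero]
          intro x hx
          obtain ⟨t, ht, hxt⟩ := List.mem_iff_getElem.mp hx
          rw [List.getElem_drop] at hxt
          have := hmono 1 (2 + t) (by omega) (by simp at ht; omega)
          simp only [decide_eq_true_eq]
          omega
        calc s.countP (fun x => decide (x < s[1]))
            = (s[0] :: s[1] :: s.drop 2).countP (fun x => decide (x < s[1])) := by rw [hshape]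
          _ ≤ 1 := by
              rw [List.countP_cons, List.countP_cons, hdrop]
              simp only [decide_eq_true_eq, lt_self_iff_false, if_false]
              split <;> simp
      have hcnt2 : 2 ≤ (y :: rest).countP (fun x => decide (x < s[1])) := by
        rw [List.countP_cons, if_pos (by simp; omega)]
        have : 1 ≤ rest.countP (fun x => decide (x < s[1])) := by
          rw [Nat.one_le_iff_ne_zero]
          simp only [ne_eq, List.countP_eq_zero, not_forall]
          exact ⟨a, ha, by simp; omega⟩
        omega
      rw [hp.countP_eq (fun x => decide (x < s[1]))] at hcnt1
      omega
    omega
  · intro hlt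
    refine badM_of_perm hperm ⟨s[0], s.eraseIdx 0, (List.getElem_cons_eraseIdx_perm h0).symm,
      s[1], mem_eraseIdx_of_ne s 1 0 h1 h0 (by omega),
      s[tri.length - 1], mem_eraseIdx_of_ne s (tri.length - 1) 0 hl h0 (by omega), by omega⟩

lemma check_alt_iff (tri : List Int) : check_alt tri = true ↔ ¬ badB tri := by
  by_cases h2 : (tri.length : Int) < 2
  · have hca : check_alt tri = true := by
      unfold check_alt
      rw [if_pos h2]
    rw [hca]
    simp only [true_iff]
    rintro ⟨i, j, k, hi, hj, hk, hij, hjk, hlt⟩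
    omega
  · have hn2 : 2 ≤ tri.length := by omega
    have hperm : (PySem.List.sorted tri (fun x => x) false).Perm tri :=
      PySem.List.sorted_perm tri (fun x => x) false
    have hlen : (PySem.List.sorted tri (fun x => x) false).length = tri.length := hperm.length_eq
    set s := PySem.List.sorted tri (fun x => x) false with hs
    have hca : check_alt tri =
        decide (PySem.List.pyGetD s 0 0 + PySem.List.pyGetD s 1 0 ≥ PySem.List.pyGetD s (-1) 0) := by
      unfold check_alt
      rw [if_neg h2]
    rw [hca, PySem.List.pyGetD_neg_ofNat s 1 0 (by omega) (by omega),
      PySem.List.pyGetD_zero, PySem.List.pyGetD_eq_getElem s (i := 1) 0 (by omega) (by omega)]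
    simp only [Int.toNat_one]
    rw [badB_iff_badM, badM_sorted tri hn2, ← hs]
    rw [List.getD_eq_getElem _ _ (show (0:Nat) < s.length by omega),
      List.getD_eq_getElem _ _ (show (1:Nat) < s.length by omega),
      List.getD_eq_getElem _ _ (show tri.length - 1 < s.length by omega)]
    have hidx : s.length - 1 = tri.length - 1 := by omega
    simp only [decide_eq_true_eq, ge_iff_le]
    have hsame : s[s.length - 1]'(by omega) = s[tri.length - 1]'(by omega) :=
      getElem_congr rfl hidx (by omega)
    rw [hsame]
    omega

-- ===== VERDICT (by name: the statement is the Claim_ definition above) =====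
theorem check_spec : Claim_equal_check := by
  intro tri _
  unfold Spec_check
  rw [Bool.eq_iff_iff, check_iff, check_alt_iff]
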